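-- pv_equiv track=rewrite | github.com/Envinorma/envinorma-data | envinorma/enriching/title_reference.py | _remove_special_words
-- ===== SOURCE A (Python) =====
-- _SPECIAL_WORDS = ['titre', 'chapitre', 'section', 'annexes', 'annexe', 'article']
--
-- def _remove_special_words(title: str) -> str:
--     new_title = title
--     for word in _SPECIAL_WORDS:
--         if new_title.lower().startswith(word):
--             new_title = new_title[len(word) :].strip()
--     if new_title != title:
--         return _remove_special_words(new_title)
--     return new_title
-- ===== SOURCE B (Python) =====
-- _SPECIAL_WORDS = ['titre', 'chapitre', 'section', 'annexes', 'annexe', 'article']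
--
-- def _remove_special_words(title: str) -> str:
--     new_title = title
--     changed = True
--     while changed:
--         changed = False
--         for word in _SPECIAL_WORDS:
--             if new_title.lower().startswith(word):
--                 new_title = new_title[len(word):].strip()
--                 changed = True
--     return new_title
-- ===== Notes on version B (the rewrite author's own statement) =====
-- stated objective: alternative
-- what changed: Replaces A's restart-by-recursion (re-running the pass whenever the string changed, detected by comparing the whole string) with an iterative while-loop driven by a boolean changed flag set inside the stripping pass, so no string comparison and no recursion (hence no RecursionError depth limit) is needed.
import Mathlib
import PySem

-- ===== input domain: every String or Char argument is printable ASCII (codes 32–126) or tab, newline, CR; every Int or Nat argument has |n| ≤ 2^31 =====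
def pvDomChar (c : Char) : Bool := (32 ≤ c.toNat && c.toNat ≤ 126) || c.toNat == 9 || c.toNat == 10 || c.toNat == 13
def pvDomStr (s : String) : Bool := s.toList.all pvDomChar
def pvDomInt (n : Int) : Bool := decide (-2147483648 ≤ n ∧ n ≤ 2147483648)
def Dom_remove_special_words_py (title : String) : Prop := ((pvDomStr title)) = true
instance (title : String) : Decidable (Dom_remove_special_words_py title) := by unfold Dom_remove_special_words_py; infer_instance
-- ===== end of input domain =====

-- B replaces A's restart-by-recursion with an iterative loop driven by a boolean changed flag
-- set inside the stripping pass (objective: alternative decomposition, same cost).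


-- ===== PORT A =====
def pvSpecialWords : List String := ["titre", "chapitre", "section", "annexes", "annexe", "article"]

-- one word of the for-loop body: if new_title.lower().startswith(word): new_title = new_title[len(word):].strip()
def pvStepA (nt : String) (word : String) : String :=
  if PySem.Str.startswith (PySem.Str.lower nt) word then
    PySem.Str.strip (PySem.Str.slice nt (some (PySem.Str.len word)) none)
  else nt

-- the 'for word in _SPECIAL_WORDS' pass of A
def pvPassA (title : String) : String := pvSpecialWords.foldl pvStepA title

-- termination lemmas for the recursion (cited by name in decreasing_by)
theorem pvStripLen (nt word : String) (hw : word.toList ≠ [])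
    (h : PySem.Str.startswith (PySem.Str.lower nt) word = true) :
    (PySem.Str.strip (PySem.Str.slice nt (some (PySem.Str.len word)) none)).toList.length < nt.toList.length := by
  have hpre : word.toList <+: (PySem.Str.lower nt).toList :=
    (PySem.Chars.startswith_iff _ _).mp (by simpa using h)
  have hle : word.toList.length ≤ nt.toList.length := by
    have := hpre.length_le
    simpa [PySem.Str.toList_lower, PySem.Chars.lower] using this
  have hwpos : 0 < word.toList.length := List.length_pos_iff.mpr hw
  have hlen : (PySem.Str.len word) = ((word.toList.length : Nat) : Int) := by
    simp [PySem.Str.len]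
  have hslice : (PySem.Str.slice nt (some (PySem.Str.len word)) none).toList
      = nt.toList.drop word.toList.length := by
    rw [hlen]
    simp [PySem.Str.toList_slice, PySem.List.slice_from_natCast]
  rw [PySem.Str.toList_strip, hslice]
  unfold PySem.Chars.strip PySem.Chars.rstrip PySem.Chars.lstrip
  have a1 := List.length_dropWhile_le PySem.Chars.isspace (nt.toList.drop word.toList.length)
  have a2 := List.length_dropWhile_le PySem.Chars.isspace
      ((nt.toList.drop word.toList.length).dropWhile PySem.Chars.isspace).reverse
  simp only [List.length_reverse, List.length_drop] at *
  omega

theorem pvStepA_len (nt word : String) (hw : word.toList ≠ []) :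
    pvStepA nt word = nt ∨ (pvStepA nt word).toList.length < nt.toList.length := by
  unfold pvStepA
  split_ifs with h
  · exact Or.inr (pvStripLen nt word hw h)
  · exact Or.inl rfl

theorem pvFoldA_len (l : List String) (hl : ∀ w ∈ l, w.toList ≠ []) (t : String) :
    l.foldl pvStepA t = t ∨ (l.foldl pvStepA t).toList.length < t.toList.length := by
  induction l generalizing t with
  | nil => exact Or.inl rfl
  | cons w l ih =>
    simp only [List.foldl_cons]
    rcases pvStepA_len t w (hl w (by simp)) with h | h
    · rw [h]; exact ih (fun x hx => hl x (by simp [hx])) t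
    · rcases ih (fun x hx => hl x (by simp [hx])) (pvStepA t w) with h2 | h2
      · rw [h2]; exact Or.inr h
      · exact Or.inr (lt_trans h2 h)

theorem pvPassA_len (t : String) :
    pvPassA t = t ∨ (pvPassA t).toList.length < t.toList.length :=
  pvFoldA_len pvSpecialWords (by decide) t

def remove_special_words_py (title : String) : String :=
  let new_title := pvPassA title
  if new_title ≠ title then remove_special_words_py new_title
  else new_title
termination_by title.toList.length
decreasing_by
  rcases pvPassA_len title with h | h
  · exact absurd h (by assumption)
  · exact h

-- ===== PORT B =====
-- one word of B's for-loop body: also raises the changed flag when it strips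
def pvStepB (s : String × Bool) (word : String) : String × Bool :=
  if PySem.Str.startswith (PySem.Str.lower s.1) word then
    (PySem.Str.strip (PySem.Str.slice s.1 (some (PySem.Str.len word)) none), true)
  else s

-- B's pass: runs the word loop with changed = False and reports the final flag
def pvPassB (new_title : String) : String × Bool := pvSpecialWords.foldl pvStepB (new_title, false)

-- loop invariant of B's pass: either nothing fired (state unchanged) or the string shrank and the flag is up
theorem pvFoldB_len (l : List String) (hl : ∀ w ∈ l, w.toList ≠ []) :
    ∀ (t : String) (b : Bool),
      (l.foldl pvStepB (t, b)) = (t, b) ∨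
      ((l.foldl pvStepB (t, b)).1.toList.length < t.toList.length ∧ (l.foldl pvStepB (t, b)).2 = true) := by
  induction l with
  | nil => intro t b; exact Or.inl rfl
  | cons w l ih =>
    intro t b
    simp only [List.foldl_cons]
    by_cases h : PySem.Str.startswith (PySem.Str.lower t) w = true
    · have hstep : pvStepB (t, b) w
          = (PySem.Str.strip (PySem.Str.slice t (some (PySem.Str.len w)) none), true) := by
        unfold pvStepB; rw [if_pos h]
      rw [hstep]
      have hlt := pvStripLen t w (hl w (by simp)) h
      rcases ih (fun x hx => hl x (by simp [hx]))
          (PySem.Str.strip (PySem.Str.slice t (some (PySem.Str.len w)) none)) true with h2 | h2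
      · rw [h2]; exact Or.inr ⟨hlt, rfl⟩
      · exact Or.inr ⟨lt_trans h2.1 hlt, h2.2⟩
    · have hstep : pvStepB (t, b) w = (t, b) := by
        unfold pvStepB; rw [if_neg h]
      rw [hstep]
      exact ih (fun x hx => hl x (by simp [hx])) t b

theorem pvPassB_snd_true_len (t : String) (h : (pvPassB t).2 = true) :
    (pvPassB t).1.toList.length < t.toList.length := by
  rcases pvFoldB_len pvSpecialWords (by decide) t false with h2 | h2
  · rw [show pvPassB t = pvSpecialWords.foldl pvStepB (t, false) from rfl, h2] at h
    simp at h
  · exact h2.1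

def pvLoopB (new_title : String) : String :=
  let r := pvPassB new_title
  if r.2 then pvLoopB r.1
  else r.1
termination_by new_title.toList.length
decreasing_by
  exact pvPassB_snd_true_len new_title (by assumption)

def remove_special_words_py_alt (title : String) : String := pvLoopB title

-- ===== PRECONDITION & SPEC =====
def Spec_remove_special_words_py (title : String) (out : String) : Prop := out = remove_special_words_py_alt title
instance (title : String) (out : String) : Decidable (Spec_remove_special_words_py title out) := by unfold Spec_remove_special_words_py; infer_instance

-- ===== CLAIM (what is proved, stated in full; the proofs are below) =====
def Claim_equal_remove_special_words_py : Prop := ∀ (title : String), Dom_remove_special_words_py title → Spec_remove_special_words_py title (remove_special_words_py title)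

-- ===== LEMMAS AND PROOFS =====
-- the two passes compute the same string (the flag does not influence the string updates)
theorem pvFold_fst (l : List String) : ∀ (t : String) (b : Bool),
    (l.foldl pvStepB (t, b)).1 = l.foldl pvStepA t := by
  induction l with
  | nil => intro t b; rfl
  | cons w l ih =>
    intro t b
    simp only [List.foldl_cons]
    unfold pvStepB pvStepA
    by_cases h : PySem.Str.startswith (PySem.Str.lower t) w = true
    · rw [if_pos h, if_pos h]; exact ih _ true
    · rw [if_neg h, if_neg h]; exact ih t b

theorem pvPassB_fst (t : String) : (pvPassB t).1 = pvPassA t :=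
  pvFold_fst pvSpecialWords t false

theorem pvPassB_snd_false (t : String) (h : (pvPassB t).2 = false) : pvPassA t = t := by
  rcases pvFoldB_len pvSpecialWords (by decide) t false with h2 | h2
  · rw [← pvPassB_fst, show pvPassB t = pvSpecialWords.foldl pvStepB (t, false) from rfl, h2]
  · rw [show pvPassB t = pvSpecialWords.foldl pvStepB (t, false) from rfl] at h
    rw [h2.2] at h; simp at h

set_option maxRecDepth 4000 in
theorem pv_main (n : Nat) : ∀ t : String, t.toList.length ≤ n → remove_special_words_py t = pvLoopB t := by
  induction n with
  | zero =>
    intro t ht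
    unfold remove_special_words_py pvLoopB
    by_cases hb : (pvPassB t).2 = true
    · exact absurd (pvPassB_snd_true_len t hb) (by omega)
    · have hfix := pvPassB_snd_false t (by simpa using hb)
      simp [hb, hfix, pvPassB_fst]
  | succ n ih =>
    intro t ht
    unfold remove_special_words_py pvLoopB
    by_cases hb : (pvPassB t).2 = true
    · have hlt := pvPassB_snd_true_len t hb
      have hne : pvPassA t ≠ t := by
        rw [← pvPassB_fst]
        intro hc
        rw [hc] at hlt
        omega
      rw [if_pos hb, if_pos hne]
      rw [pvPassB_fst]
      exact ih (pvPassA t) (by rw [← pvPassB_fst]; omega)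
    · have hfix := pvPassB_snd_false t (by simpa using hb)
      simp [hb, hfix, pvPassB_fst]

-- ===== VERDICT (by name: the statement is the Claim_ definition above) =====
theorem remove_special_words_py_spec : Claim_equal_remove_special_words_py := by
  intro title _
  unfold Spec_remove_special_words_py remove_special_words_py_alt
  exact pv_main title.toList.length title le_rfl
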